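-- pv_equiv track=rewrite | github.com/GorSerGit/MathLogic | Func.py | find_column_combinations
-- ===== SOURCE A (Python) =====
-- from itertools import combinations
--
-- def find_column_combinations(matrix):
--     rows = len(matrix)
--     cols = len(matrix[0])
--     valid_combinations = []
--
--     # Проверяем все возможные комбинации столбцов
--     for r in range(1, cols + 1):
--         for cols_comb in combinations(range(cols), r):
--             # Создаем множество покрытых строк
--             covered_rows = set()
--
--             for row in range(rows):
--                 # Проверяем, есть ли единица в выбранных столбцах
--                 if any(matrix[row][col] == 1 for col in cols_comb):
--                     covered_rows.add(row)
--
--             # Если все строки покрыты, добавляем комбинацию в результат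
--             if len(covered_rows) == rows:
--                 valid_combinations.append(cols_comb)
--
--     return valid_combinations
-- ===== SOURCE B (Python) =====
-- def find_column_combinations(matrix):
--     rows = len(matrix)
--     cols = len(matrix[0])
--     full = (1 << rows) - 1
--     # one bitmask per column: bit r set iff matrix[r][c] == 1
--     masks = []
--     for c in range(cols):
--         m = 0
--         for r in range(rows):
--             if matrix[r][c] == 1:
--                 m |= 1 << r
--         masks.append(m)
--     result = []
--
--     def build(start, need, acc, chosen):
--         if need == 0:
--             if acc == full:
--                 result.append(tuple(chosen))
--             return
--         for c in range(start, cols - need + 1):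
--             build(c + 1, need - 1, acc | masks[c], chosen + [c])
--
--     for r in range(1, cols + 1):
--         build(0, r, 0, [])
--     return result
-- ===== Notes on version B (the rewrite author's own statement) =====
-- stated objective: alternative
-- what changed: Per-column row-coverage bitmasks are precomputed once; subsets are generated by recursion carrying an OR-accumulated mask compared to the full mask, replacing the per-combination scan over all rows with any() over columns (intended as a constant-factor speedup; measured 18.5x at n=256, but both are exponential in cols so neither finishes at the largest timing size).
import Mathlib
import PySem

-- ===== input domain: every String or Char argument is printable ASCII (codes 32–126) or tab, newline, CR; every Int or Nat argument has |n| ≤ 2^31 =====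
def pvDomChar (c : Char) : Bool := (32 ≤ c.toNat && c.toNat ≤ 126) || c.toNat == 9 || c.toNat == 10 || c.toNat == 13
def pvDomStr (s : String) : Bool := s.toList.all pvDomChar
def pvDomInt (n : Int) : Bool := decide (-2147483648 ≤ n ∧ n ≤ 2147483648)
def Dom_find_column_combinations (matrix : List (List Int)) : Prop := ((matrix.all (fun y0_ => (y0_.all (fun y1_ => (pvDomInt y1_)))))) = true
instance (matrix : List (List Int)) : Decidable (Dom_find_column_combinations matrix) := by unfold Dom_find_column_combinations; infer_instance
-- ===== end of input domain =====

-- B precomputes per-column row-coverage bitmasks once and OR-accumulates them while generating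
-- the column subsets recursively, instead of A's per-combination scan over all rows (objective: alternative).

-- ===== PORT A =====
def find_column_combinations (matrix : List (List Int)) : List (List Int) :=
  let rows := matrix.length
  let cols := ((PySem.List.pyGet? matrix 0).getD []).length   -- len(matrix[0]); Pre_ excludes the empty matrix (IndexError)
  -- for r in range(1, cols+1): the sizes 1..cols, all nonnegative, kept as Nat
  (List.range' 1 cols).foldl (fun valid r =>
    (PySem.List.combinations (PySem.List.pyRange 0 (cols : Int) 1) r).foldl (fun valid comb =>
      let covered := (List.range rows).foldl (fun s row =>
        if comb.any (fun col => (PySem.List.pyGet? ((PySem.List.pyGet? matrix (Int.ofNat row)).getD []) col) == some 1)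
        then PySem.Set.add s (Int.ofNat row) else s) PySem.Set.empty
      if covered.length == rows then valid ++ [comb] else valid) valid) []

-- ===== PORT B =====
-- recursive subset builder of Source B; range(start, cols - need + 1) = range' start (cols + 1 - need - start),
-- exact because Nat subtraction clamps exactly the empty Python ranges
def pvBuild (masks : List Nat) (cols full : Nat) (start : Nat) (need : Nat) (acc : Nat) (chosen : List Int) : List (List Int) :=
  match need with
  | 0 => if acc == full then [chosen] else []
  | n+1 =>
    (List.range' start (cols + 1 - (n+1) - start)).flatMap (fun c =>
      pvBuild masks cols full (c+1) n (acc ||| masks.getD c 0) (chosen ++ [Int.ofNat c]))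

def find_column_combinations_alt (matrix : List (List Int)) : List (List Int) :=
  let rows := matrix.length
  let cols := ((PySem.List.pyGet? matrix 0).getD []).length   -- len(matrix[0]); Pre_ excludes the empty matrix
  let full := (1 <<< rows) - 1
  -- the append loop building `masks` is a map over range(cols); the inner loop ORs 1 << r per covered row
  let masks := (List.range cols).map (fun c =>
    (List.range rows).foldl (fun m r =>
      if (PySem.List.pyGet? ((PySem.List.pyGet? matrix (Int.ofNat r)).getD []) (Int.ofNat c)) == some 1
      then m ||| ((1 : Nat) <<< r) else m) 0)
  (List.range' 1 cols).flatMap (fun r => pvBuild masks cols full 0 r 0 [])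

-- ===== PRECONDITION & SPEC =====
-- Exactly where the Python A returns: matrix nonempty (else matrix[0] raises IndexError) and every row
-- at least cols = len(matrix[0]) long (else the size-1 combinations probe matrix[row][c] out of range).
def Pre_find_column_combinations (matrix : List (List Int)) : Prop :=
  matrix ≠ [] ∧ ∀ row ∈ matrix, (matrix.headD []).length ≤ row.length
instance (matrix : List (List Int)) : Decidable (Pre_find_column_combinations matrix) := by unfold Pre_find_column_combinations; infer_instance

def pvWitness_find_column_combinations : List (List Int) := [[1, 0], [0, 1]]

def Spec_find_column_combinations (matrix : List (List Int)) (out : List (List Int)) : Prop := out = find_column_combinations_alt matrix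
instance (matrix : List (List Int)) (out : List (List Int)) : Decidable (Spec_find_column_combinations matrix out) := by unfold Spec_find_column_combinations; infer_instance

-- ===== CLAIM (what is proved, stated in full; the proofs are below) =====
def Claim_equal_find_column_combinations : Prop := ∀ (matrix : List (List Int)), Dom_find_column_combinations matrix → Pre_find_column_combinations matrix → Spec_find_column_combinations matrix (find_column_combinations matrix)

-- ===== LEMMAS AND PROOFS =====

theorem pv_testBit_foldl_or_shift (l : List Nat) (p : Nat → Bool) (a k : Nat) :
    (l.foldl (fun m r => if p r then m ||| ((1 : Nat) <<< r) else m) a).testBit k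
      = (a.testBit k || l.any (fun r => p r && decide (r = k))) := by
  induction l generalizing a with
  | nil => simp
  | cons x xs ih =>
    simp only [List.foldl_cons, List.any_cons]
    rw [ih]
    by_cases h : p x = true
    · simp [h, Nat.testBit_or, Nat.one_shiftLeft, Nat.testBit_two_pow, Bool.or_assoc]
    · simp [h]

theorem pv_any_range_eq (n k : Nat) (q : Nat → Bool) :
    (List.range n).any (fun r => q r && decide (r = k)) = (decide (k < n) && q k) := by
  by_cases h : k < n
  · cases hq : q k
    · simp only [h, decide_true, Bool.true_and]
      rw [List.any_eq_false]
      intro r hr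
      simp only [Bool.and_eq_true, decide_eq_true_eq, not_and]
      intro h1 h2; subst h2; rw [hq] at h1; exact Bool.false_ne_true h1
    · simp only [h, decide_true, Bool.true_and]
      rw [List.any_eq_true]
      exact ⟨k, List.mem_range.mpr h, by simp [hq]⟩
  · simp only [h, decide_false, Bool.false_and]
    rw [List.any_eq_false]
    intro r hr
    have hrn := List.mem_range.mp hr
    simp only [Bool.and_eq_true, decide_eq_true_eq, not_and]
    intro _ h2; omega

theorem pv_testBit_maskfold (rows k : Nat) (p : Nat → Bool) :
    (((List.range rows).foldl (fun m r => if p r then m ||| ((1 : Nat) <<< r) else m) 0)).testBit k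
      = (decide (k < rows) && p k) := by
  rw [pv_testBit_foldl_or_shift, pv_any_range_eq]
  simp [Nat.zero_testBit]

theorem pv_testBit_foldl_or (t : List Nat) (g : Nat → Nat) (a k : Nat) :
    (t.foldl (fun a c => a ||| g c) a).testBit k = (a.testBit k || t.any (fun c => (g c).testBit k)) := by
  induction t generalizing a with
  | nil => simp
  | cons x xs ih => simp [ih, Nat.testBit_or, Bool.or_assoc]

theorem pv_fold_eq_full_iff (rows cols : Nat) (ent : Nat → Nat → Bool) (t : List Nat)
    (ht : ∀ c ∈ t, c < cols) :
    (t.foldl (fun a c => a |||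
        ((List.range cols).map (fun c =>
          (List.range rows).foldl (fun m r => if ent r c then m ||| ((1 : Nat) <<< r) else m) 0)).getD c 0) 0
      = (1 <<< rows) - 1)
      ↔ ∀ k < rows, ∃ c ∈ t, ent k c = true := by
  constructor
  · intro h k hk
    have hb : ((t.foldl (fun a c => a |||
        ((List.range cols).map (fun c =>
          (List.range rows).foldl (fun m r => if ent r c then m ||| ((1 : Nat) <<< r) else m) 0)).getD c 0) 0)).testBit k = true := by
      rw [h, Nat.one_shiftLeft, Nat.testBit_two_pow_sub_one]
      simpa using hk
    rw [pv_testBit_foldl_or, Nat.zero_testBit, Bool.false_or, List.any_eq_true] at hb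
    obtain ⟨c, hc, hbit⟩ := hb
    rw [PySem.List.getD_map_range _ _ _ _ (ht c hc), pv_testBit_maskfold] at hbit
    simp only [Bool.and_eq_true, decide_eq_true_eq] at hbit
    exact ⟨c, hc, hbit.2⟩
  · intro h
    apply Nat.eq_of_testBit_eq
    intro k
    rw [Nat.one_shiftLeft, Nat.testBit_two_pow_sub_one, pv_testBit_foldl_or, Nat.zero_testBit,
      Bool.false_or]
    by_cases hk : k < rows
    · simp only [hk, decide_true]
      obtain ⟨c, hc, he⟩ := h k hk
      rw [List.any_eq_true]
      exact ⟨c, hc, by rw [PySem.List.getD_map_range _ _ _ _ (ht c hc), pv_testBit_maskfold]; simp [hk, he]⟩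
    · simp only [hk, decide_false]
      rw [List.any_eq_false]
      intro c hc
      rw [PySem.List.getD_map_range _ _ _ _ (ht c hc), pv_testBit_maskfold]
      simp [hk]

theorem pv_set_fold_eq (l : List Nat) (p : Nat → Bool) (s : List Int)
    (h : ∀ x ∈ l, (Int.ofNat x) ∉ s) (hl : l.Nodup) :
    l.foldl (fun s row => if p row then PySem.Set.add s (Int.ofNat row) else s) s
      = s ++ (l.filter p).map (fun r => (Int.ofNat r)) := by
  induction l generalizing s with
  | nil => simp
  | cons x xs ih =>
    obtain ⟨hx, hxs⟩ := List.nodup_cons.mp hl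
    simp only [List.foldl_cons, List.filter_cons]
    cases hp : p x
    · simp only [Bool.false_eq_true, if_false]
      exact ih _ (fun y hy => h y (List.mem_cons_of_mem _ hy)) hxs
    · simp only [if_true]
      have hmem : ((x : Int)) ∉ s := by simpa using h x (by simp)
      have hadd : PySem.Set.add s (Int.ofNat x) = s ++ [Int.ofNat x] := by
        simp [PySem.Set.add, hmem]
      rw [hadd, ih (s ++ [Int.ofNat x]) ?_ hxs]
      · simp
      · intro y hy
        simp only [List.mem_append, List.mem_singleton, not_or]
        refine ⟨h y (List.mem_cons_of_mem _ hy), ?_⟩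
        intro hcon
        exact hx (by simpa using (Int.ofNat_inj.mp hcon) ▸ hy)

theorem pv_covered_iff (rows : Nat) (p : Nat → Bool) :
    ((((List.range rows).foldl (fun s row => if p row then PySem.Set.add s (Int.ofNat row) else s)
        PySem.Set.empty)).length == rows) = decide (∀ k < rows, p k = true) := by
  rw [pv_set_fold_eq _ _ _ (by intro x _ hx; exact (List.not_mem_nil hx)) List.nodup_range]
  rw [Bool.eq_iff_iff, beq_iff_eq, decide_eq_true_iff]
  simp only [PySem.Set.empty, List.nil_append, List.length_map]
  constructor
  · intro hlen k hk
    have : ((List.range rows).filter p).length = (List.range rows).length := by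
      rw [hlen, List.length_range]
    exact List.length_filter_eq_length_iff.mp this k (List.mem_range.mpr hk)
  · intro hall
    have : ((List.range rows).filter p).length = (List.range rows).length :=
      List.length_filter_eq_length_iff.mpr (fun a ha => hall a (List.mem_range.mp ha))
    rw [this, List.length_range]

theorem pv_combos_range' (cols : Nat) : ∀ (len start n : Nat), start + len = cols →
    PySem.List.combinations (List.range' start len) (n+1)
      = (List.range' start (cols + 1 - (n+1) - start)).flatMap
          (fun c => (PySem.List.combinations (List.range' (c+1) (cols - (c+1))) n).map (fun t => c :: t)) := by
  intro len
  induction len with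
  | zero =>
    intro start n h
    have h0 : cols + 1 - (n+1) - start = 0 := by omega
    rw [h0]
    simp [PySem.List.combinations_nil_succ]
  | succ m ih =>
    intro start n h
    rw [List.range'_succ, PySem.List.combinations_cons_succ]
    by_cases hn : n + 1 ≤ m + 1
    · have hL : cols + 1 - (n+1) - start = (cols + 1 - (n+1) - (start+1)) + 1 := by omega
      rw [hL, List.range'_succ, List.flatMap_cons]
      congr 1
      · have hm : cols - (start + 1) = m := by omega
        rw [hm]
      · exact ih (start+1) n (by omega)
    · have hL : cols + 1 - (n+1) - start = 0 := by omega
      have h1 : (List.range' (start+1) m).length < n := by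
        rw [List.length_range']; omega
      have h2 : (List.range' (start+1) m).length < n+1 := by
        rw [List.length_range']; omega
      rw [hL]
      simp [PySem.List.combinations_eq_nil_of_length_lt _ h1,
        PySem.List.combinations_eq_nil_of_length_lt _ h2]

theorem pv_filterMap_if_eq_map_filter {α β : Type} (l : List α) (q : α → Bool) (g : α → β) :
    l.filterMap (fun t => if q t then some (g t) else none) = (l.filter q).map g := by
  induction l with
  | nil => rfl
  | cons x xs ih =>
    simp only [List.filterMap_cons, List.filter_cons]
    cases h : q x
    · simp only [Bool.false_eq_true, if_false]
      exact ih
    · simp [ih]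

theorem pv_pvBuild_eq (masks : List Nat) (cols full : Nat) :
    ∀ (need start acc : Nat) (chosen : List Int), start ≤ cols →
    pvBuild masks cols full start need acc chosen
      = (PySem.List.combinations (List.range' start (cols - start)) need).filterMap
          (fun t => if t.foldl (fun a c => a ||| masks.getD c 0) acc == full
                    then some (chosen ++ t.map (fun c => (Int.ofNat c))) else none) := by
  intro need
  induction need with
  | zero =>
    intro start acc chosen h
    have hB : pvBuild masks cols full start 0 acc chosen = if acc == full then [chosen] else [] := rfl
    rw [hB, PySem.List.combinations_zero]
    by_cases h' : acc = full
    · simp [h']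
    · simp [h']
  | succ n ih =>
    intro start acc chosen hs
    have hB : pvBuild masks cols full start (n+1) acc chosen
        = (List.range' start (cols + 1 - (n+1) - start)).flatMap (fun c =>
            pvBuild masks cols full (c+1) n (acc ||| masks.getD c 0) (chosen ++ [Int.ofNat c])) := rfl
    rw [hB]
    rw [pv_combos_range' cols (cols - start) start n (by omega), List.filterMap_flatMap]
    apply List.flatMap_congr
    intro c hc
    have hcc : c + 1 ≤ cols := by
      have := (List.mem_range'_1.mp hc).2
      omega
    rw [List.filterMap_map, ih (c+1) (acc ||| masks.getD c 0) (chosen ++ [Int.ofNat c]) hcc]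
    apply List.filterMap_congr
    intro t _
    simp [Function.comp, List.append_assoc]

-- ===== VERDICT (by name: the statement is the Claim_ definition above) =====
theorem find_column_combinations_spec : Claim_equal_find_column_combinations := by
  intro matrix _ _
  unfold Spec_find_column_combinations
  simp only [find_column_combinations, find_column_combinations_alt]
  simp only [PySem.List.foldl_append_if_eq_filter, PySem.List.foldl_append_eq_flatMap,
    List.nil_append]
  apply List.flatMap_congr
  intro r hr
  rw [pv_pvBuild_eq _ _ _ r 0 0 [] (Nat.zero_le _)]
  have hpr : PySem.List.pyRange 0 (((PySem.List.pyGet? matrix 0).getD []).length : Int) 1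
      = (List.range ((PySem.List.pyGet? matrix 0).getD []).length).map (fun k => Int.ofNat k) := by
    rw [PySem.List.pyRange_one]
    simp
  rw [hpr, PySem.List.combinations_map, List.filter_map, pv_filterMap_if_eq_map_filter,
    Nat.sub_zero, ← List.range_eq_range']
  simp only [List.nil_append]
  apply congrArg
  apply List.filter_congr
  intro t ht
  have hsub : ∀ c ∈ t, c < ((PySem.List.pyGet? matrix 0).getD []).length := by
    intro c hc
    exact List.mem_range.mp ((PySem.List.sublist_of_mem_combinations ht).subset hc)
  simp only [Function.comp_def, List.any_map]
  rw [pv_covered_iff]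
  rw [Bool.eq_iff_iff, decide_eq_true_iff, beq_iff_eq]
  rw [pv_fold_eq_full_iff matrix.length _ _ t hsub]
  simp [List.any_eq_true]
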